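-- pv_equiv track=rewrite | github.com/imranahmad737291-sys/METQEAHackathon | feature_generator.py | clean_feature_file
-- ===== SOURCE A (Python) =====
-- def clean_feature_file(text: str) -> str:
--     """
--     Keep only lines starting with valid Gherkin keywords or tags.
--     """
--     valid_keywords = [
--         "Feature:", "Scenario:", "Scenario Outline:", "Background:",
--         "Given", "When", "Then", "And", "But", "Examples:", "@"
--     ]
--     lines = text.splitlines()
--     cleaned = []
--     for line in lines:
--         stripped = line.lstrip()
--         if any(stripped.startswith(kw) for kw in valid_keywords):
--             cleaned.append(line)
--     return "\n".join(cleaned)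
-- ===== SOURCE B (Python) =====
-- _KEYWORDS = [
--     "Feature:", "Scenario:", "Scenario Outline:", "Background:",
--     "Given", "When", "Then", "And", "But", "Examples:", "@"
-- ]
--
--
-- def _match(s):
--     # simultaneous multi-pattern scan: walk the line once, keeping the set of
--     # keyword suffixes still viable; accept when some keyword is fully consumed
--     cands = list(_KEYWORDS)
--     for ch in s:
--         if "" in cands:
--             return True
--         cands = [c[1:] for c in cands if c and c[0] == ch]
--         if not cands:
--             return False
--     return "" in cands
--
--
-- def clean_feature_file(text: str) -> str:
--     return "\n".join(line for line in text.splitlines() if _match(line.lstrip()))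
-- ===== Notes on version B (the rewrite author's own statement) =====
-- stated objective: alternative
-- what changed: Per kept/dropped decision, replaces A's 11 independent startswith prefix tests (any over the keyword list) with a single simultaneous multi-pattern scan: one walk over the line's characters maintaining the shrinking set of still-viable keyword suffixes (a lazily materialised trie walk), accepting when a keyword is fully consumed.
import Mathlib
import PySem

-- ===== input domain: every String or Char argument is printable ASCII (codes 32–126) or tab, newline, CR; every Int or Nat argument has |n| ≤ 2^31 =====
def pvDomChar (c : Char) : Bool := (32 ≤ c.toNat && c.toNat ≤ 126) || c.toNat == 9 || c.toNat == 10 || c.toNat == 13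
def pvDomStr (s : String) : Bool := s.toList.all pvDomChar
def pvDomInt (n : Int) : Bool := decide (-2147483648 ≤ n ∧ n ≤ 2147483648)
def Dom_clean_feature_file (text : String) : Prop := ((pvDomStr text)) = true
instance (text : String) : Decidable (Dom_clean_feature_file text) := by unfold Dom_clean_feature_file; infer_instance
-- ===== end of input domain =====

-- B replaces A's 11 independent startswith tests per line with one simultaneous
-- character scan over a shrinking set of candidate keyword suffixes (alternative algorithm, same cost class).

-- ===== PORT A =====
def clean_feature_file (text : String) : String :=
  let valid_keywords : List String :=
    ["Feature:", "Scenario:", "Scenario Outline:", "Background:",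
     "Given", "When", "Then", "And", "But", "Examples:", "@"]
  let lines := PySem.Str.splitlines text
  let cleaned := lines.foldl (fun acc line =>
    let stripped := PySem.Str.lstrip line
    if valid_keywords.any (fun kw => PySem.Str.startswith stripped kw) then acc ++ [line] else acc) []
  PySem.Str.join "\n" cleaned

-- ===== PORT B =====
-- Source B's keyword list (candidates are Python strings; ported as char lists, on which
-- Python's c[0], c[1:], "" tests are exactly head?, drop 1, isEmpty)
def pvKeywords : List (List Char) :=
  ["Feature:", "Scenario:", "Scenario Outline:", "Background:",
   "Given", "When", "Then", "And", "But", "Examples:", "@"].map String.toList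

-- Source B's _match loop: walk the line's chars, filtering the candidate-suffix set
def pvStep (s : List Char) (cands : List (List Char)) : Bool :=
  match s with
  | [] => cands.contains []
  | ch :: rest =>
    if cands.contains [] then true
    else
      let cands' := (cands.filter (fun c => c.head? == some ch)).map (List.drop 1)
      if cands'.isEmpty then false else pvStep rest cands'

def clean_feature_file_alt (text : String) : String :=
  PySem.Str.join "\n" ((PySem.Str.splitlines text).filter
    (fun line => pvStep (PySem.Str.lstrip line).toList pvKeywords))

-- ===== PRECONDITION & SPEC =====
def Spec_clean_feature_file (text : String) (out : String) : Prop := out = clean_feature_file_alt text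
instance (text : String) (out : String) : Decidable (Spec_clean_feature_file text out) := by unfold Spec_clean_feature_file; infer_instance

-- ===== CLAIM (what is proved, stated in full; the proofs are below) =====
def Claim_equal_clean_feature_file : Prop := ∀ (text : String), Dom_clean_feature_file text → Spec_clean_feature_file text (clean_feature_file text)

-- ===== LEMMAS AND PROOFS =====

lemma pv_any_or (l : List (List Char)) (p q : List Char → Bool) :
    l.any (fun x => p x || q x) = (l.any p || l.any q) := by
  induction l with
  | nil => simp
  | cons a t ih => simp [ih]; cases p a <;> cases q a <;> simp

lemma pv_any_filter (l : List (List Char)) (p q : List Char → Bool) :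
    (l.filter q).any p = l.any (fun x => q x && p x) := by
  induction l with
  | nil => simp
  | cons a t ih => by_cases h : q a <;> simp [h, ih]

lemma pv_prefix_cons (c : List Char) (ch : Char) (rest : List Char) :
    c.isPrefixOf (ch :: rest) = (c.isEmpty || ((c.head? == some ch) && (c.drop 1).isPrefixOf rest)) := by
  cases c <;> simp [List.isPrefixOf]

lemma pv_contains_nil (l : List (List Char)) : l.contains [] = l.any (fun c => c.isEmpty) := by
  induction l with
  | nil => simp
  | cons a t ih => cases a <;> simp_all

-- invariant of Source B's loop: the scan accepts iff some candidate is a prefix of the rest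
lemma pvStep_eq (s : List Char) : ∀ cands : List (List Char),
    pvStep s cands = cands.any (fun c => c.isPrefixOf s) := by
  induction s with
  | nil =>
    intro cands
    simp only [pvStep, pv_contains_nil]
    exact congrArg cands.any (funext fun c => by cases c <;> simp [List.isPrefixOf])
  | cons ch rest ih =>
    intro cands
    simp only [pvStep]
    have hrhs : cands.any (fun c => c.isPrefixOf (ch :: rest))
        = (cands.any (fun c => c.isEmpty)
            || ((cands.filter (fun c => c.head? == some ch)).map (List.drop 1)).any
                 (fun c => c.isPrefixOf rest)) := by
      rw [List.any_map, pv_any_filter]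
      rw [← pv_any_or]
      exact congrArg cands.any (funext fun c => pv_prefix_cons c ch rest)
    have key : ∀ cs : List (List Char),
        (if cs.isEmpty then false else pvStep rest cs) = cs.any (fun c => c.isPrefixOf rest) := by
      intro cs
      cases cs with
      | nil => simp
      | cons a t => rw [ih]; simp
    rw [hrhs, ← pv_contains_nil]
    by_cases h0 : cands.contains ([] : List Char) = true
    · rw [if_pos h0, h0, Bool.true_or]
    · have h0' : cands.contains ([] : List Char) = false := (Bool.not_eq_true _).mp h0
      rw [if_neg h0, h0', Bool.false_or]
      exact key _

-- pointwise: A's any-over-keywords test equals B's simultaneous scan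
lemma pv_any_eq_step (s : String) :
    (["Feature:", "Scenario:", "Scenario Outline:", "Background:",
      "Given", "When", "Then", "And", "But", "Examples:", "@"] : List String).any
        (fun kw => PySem.Str.startswith s kw) = pvStep s.toList pvKeywords := by
  rw [pvStep_eq, pvKeywords, List.any_map]
  exact congrArg _ (funext fun kw => by
    simp [PySem.Str.startswith, PySem.Chars.startswith, Function.comp])

-- ===== VERDICT (by name: the statement is the Claim_ definition above) =====
theorem clean_feature_file_spec : Claim_equal_clean_feature_file := by
  intro text _
  unfold Spec_clean_feature_file clean_feature_file clean_feature_file_alt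
  simp only [PySem.List.foldl_append_if_eq_filter, List.nil_append]
  congr 1
  exact List.filter_congr (fun line _ => pv_any_eq_step (PySem.Str.lstrip line))
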